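-- pv_equiv track=rewrite | github.com/SunRain/QCurl | tests/libcurl_consistency/test_p0_connection_reuse_keepalive.py | _conn_seq_from_ports
-- ===== SOURCE A (Python) =====
-- from typing import Dict, List
--
-- def _conn_seq_from_ports(peer_ports: List[int]) -> List[int]:
--     mapping: Dict[int, int] = {}
--     seq: List[int] = []
--     next_id = 1
--     for p in peer_ports:
--         if p not in mapping:
--             mapping[p] = next_id
--             next_id += 1
--         seq.append(mapping[p])
--     return seq
-- ===== SOURCE B (Python) =====
-- from typing import List
--
-- def _conn_seq_from_ports(peer_ports: List[int]) -> List[int]: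
--     # Closed form: a port's ID is the number of distinct ports in the prefix
--     # that ends at its first occurrence.  No mapping table, no ID counter.
--     return [len(set(peer_ports[:peer_ports.index(p) + 1])) for p in peer_ports]
-- ===== Notes on version B (the rewrite author's own statement) =====
-- stated objective: alternative
-- what changed: B drops A's mapping dict and fresh-ID counter entirely: each element's ID is computed independently by a closed form, the count of distinct ports in the prefix ending at that port's first occurrence (len(set(xs[:xs.index(p)+1]))).
import Mathlib
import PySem

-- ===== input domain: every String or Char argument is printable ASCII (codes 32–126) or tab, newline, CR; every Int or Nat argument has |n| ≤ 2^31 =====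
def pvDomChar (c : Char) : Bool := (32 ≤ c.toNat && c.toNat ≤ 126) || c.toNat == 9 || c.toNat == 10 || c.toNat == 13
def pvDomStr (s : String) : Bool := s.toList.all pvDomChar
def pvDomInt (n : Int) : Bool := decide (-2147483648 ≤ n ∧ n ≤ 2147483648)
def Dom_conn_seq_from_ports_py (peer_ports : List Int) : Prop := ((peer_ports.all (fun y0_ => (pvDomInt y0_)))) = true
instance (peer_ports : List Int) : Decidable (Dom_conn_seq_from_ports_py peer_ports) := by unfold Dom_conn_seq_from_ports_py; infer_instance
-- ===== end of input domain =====

-- B replaces A's dict+counter accumulation loop by a per-element closed form: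
-- an element's ID is the number of distinct ports in the prefix ending at its
-- first occurrence; same result, no state carried between elements (alternative).

-- ===== PORT A =====
-- A's loop state: mapping dict, output list, next fresh id.  mapping[p] is always
-- present when read (A inserts first), so .getD 0 is exact here.
def connLoopA : List Int → PySem.Dict Int Int → List Int → Int → List Int
  | [], _, seq, _ => seq
  | p :: rest, m, seq, nid =>
    if PySem.Dict.contains m p then
      connLoopA rest m (seq ++ [(PySem.Dict.get? m p).getD 0]) nid
    else
      connLoopA rest (PySem.Dict.insert m p nid)
        (seq ++ [(PySem.Dict.get? (PySem.Dict.insert m p nid) p).getD 0]) (nid + 1)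

def conn_seq_from_ports_py (peer_ports : List Int) : List Int :=
  connLoopA peer_ports PySem.Dict.empty [] 1

-- ===== PORT B =====
-- [len(set(peer_ports[:peer_ports.index(p) + 1])) for p in peer_ports]
-- peer_ports.index(p) always succeeds (p is drawn from peer_ports), so .getD 0 is exact.
def conn_seq_from_ports_py_alt (peer_ports : List Int) : List Int :=
  peer_ports.map (fun p =>
    ((PySem.Set.ofList (PySem.List.slice peer_ports none
        (some ((((PySem.List.index? peer_ports p).getD 0 : Nat) : Int) + 1)))).length : Int))

-- ===== PRECONDITION & SPEC =====
def Spec_conn_seq_from_ports_py (peer_ports : List Int) (out : List Int) : Prop := out = conn_seq_from_ports_py_alt peer_ports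
instance (peer_ports : List Int) (out : List Int) : Decidable (Spec_conn_seq_from_ports_py peer_ports out) := by unfold Spec_conn_seq_from_ports_py; infer_instance

-- ===== CLAIM (what is proved, stated in full; the proofs are below) =====
def Claim_equal_conn_seq_from_ports_py : Prop := ∀ (peer_ports : List Int), Dom_conn_seq_from_ports_py peer_ports → Spec_conn_seq_from_ports_py peer_ports (conn_seq_from_ports_py peer_ports)

-- ===== LEMMAS AND PROOFS =====

-- the value B computes for p, with the slice already reduced to a take
def connBVal (xs : List Int) (p : Int) : Int :=
  ((PySem.Set.ofList (xs.take ((PySem.List.index? xs p).getD 0 + 1))).length : Int)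

lemma connAlt_eq_map_bval (xs : List Int) :
    conn_seq_from_ports_py_alt xs = xs.map (connBVal xs) := by
  unfold conn_seq_from_ports_py_alt connBVal
  refine List.map_congr_left (fun p _ => ?_)
  have h : (((PySem.List.index? xs p).getD 0 : Nat) : Int) + 1
      = (((PySem.List.index? xs p).getD 0 + 1 : Nat) : Int) := by push_cast; ring
  rw [h, PySem.List.slice_to_natCast]

lemma connBVal_fresh (seen rest : List Int) (p : Int) (hp : p ∉ seen) :
    connBVal (seen ++ p :: rest) p = ((PySem.Set.ofList seen).length : Int) + 1 := by
  have hassoc : seen ++ p :: rest = (seen ++ [p]) ++ rest := by simp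
  have hidx : PySem.List.index? (seen ++ p :: rest) p = some seen.length := by
    rw [hassoc, PySem.List.index?_append_of_mem rest (by simp),
      PySem.List.index?_append_singleton_self seen p hp]
  have htake : (seen ++ p :: rest).take (seen.length + 1) = seen ++ [p] := by
    rw [hassoc]
    have : seen.length + 1 = (seen ++ [p]).length := by simp
    rw [this, List.take_left]
  have hnm : p ∉ PySem.Set.ofList seen := by
    rw [PySem.Set.mem_ofList]; exact hp
  rw [connBVal, hidx, Option.getD_some, htake, PySem.Set.ofList_append_singleton,
    PySem.Set.add_of_not_mem hnm]
  simp

lemma connLoopA_inv (xs rest : List Int) : ∀ (seen seq : List Int) (m : PySem.Dict Int Int),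
    xs = seen ++ rest →
    (∀ q, PySem.Dict.get? m q = if q ∈ seen then some (connBVal xs q) else none) →
    connLoopA rest m seq (((PySem.Set.ofList seen).length : Int) + 1)
      = seq ++ rest.map (connBVal xs) := by
  induction rest with
  | nil => intro seen seq m _ _; simp [connLoopA]
  | cons p rest' ih =>
    intro seen seq m hx hm
    by_cases hp : p ∈ seen
    · have hc : PySem.Dict.contains m p = true := by
        rw [PySem.Dict.contains_eq_isSome_get?, hm, if_pos hp]; rfl
      rw [connLoopA, if_pos hc, hm p, if_pos hp]
      simp only [Option.getD_some]
      have hseen' : PySem.Set.ofList (seen ++ [p]) = PySem.Set.ofList seen := by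
        rw [PySem.Set.ofList_append_singleton,
          PySem.Set.add_of_mem ((PySem.Set.mem_ofList seen p).mpr hp)]
      have hmemiff : ∀ q : Int, (q ∈ seen ++ [p]) ↔ q ∈ seen := fun q => by
        simp only [List.mem_append, List.mem_singleton]
        exact ⟨fun h => h.elim id (fun h => by rw [h]; exact hp), Or.inl⟩
      have := ih (seen ++ [p]) (seq ++ [connBVal xs p]) m (by simpa using hx)
        (fun q => by rw [hm q, if_congr (hmemiff q) rfl rfl])
      rw [hseen'] at this
      rw [this]; simp
    · have hc : PySem.Dict.contains m p = false := by
        rw [PySem.Dict.contains_eq_isSome_get?, hm, if_neg hp]; rfl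
      rw [connLoopA, if_neg (by simp [hc])]
      have hbv : connBVal xs p = ((PySem.Set.ofList seen).length : Int) + 1 := by
        rw [hx]; exact connBVal_fresh seen rest' p hp
      have hseen' : PySem.Set.ofList (seen ++ [p]) = PySem.Set.ofList seen ++ [p] := by
        rw [PySem.Set.ofList_append_singleton,
          PySem.Set.add_of_not_mem (by rw [PySem.Set.mem_ofList]; exact hp)]
      have hlen : ((PySem.Set.ofList (seen ++ [p])).length : Int)
          = ((PySem.Set.ofList seen).length : Int) + 1 := by
        rw [hseen']; simp
      have := ih (seen ++ [p])
        (seq ++ [(PySem.Dict.get? (PySem.Dict.insert m p (((PySem.Set.ofList seen).length : Int) + 1)) p).getD 0])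
        (PySem.Dict.insert m p (((PySem.Set.ofList seen).length : Int) + 1))
        (by simpa using hx)
        (fun q => by
          rw [PySem.Dict.get?_insert, hm q]
          by_cases hq : q = p
          · subst hq; simp [hbv, hp]
          · by_cases hq2 : q ∈ seen <;> simp_all [List.mem_append])
      rw [hlen] at this
      rw [this]
      simp [hbv]

-- ===== VERDICT (by name: the statement is the Claim_ definition above) =====
theorem conn_seq_from_ports_py_spec : Claim_equal_conn_seq_from_ports_py := by
  intro xs _
  unfold Spec_conn_seq_from_ports_py conn_seq_from_ports_py
  rw [connAlt_eq_map_bval]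
  have h1 : (1 : Int) = ((PySem.Set.ofList ([] : List Int)).length : Int) + 1 := by simp [PySem.Set.ofList_nil]
  rw [h1, connLoopA_inv xs xs [] [] PySem.Dict.empty (by simp) (fun q => by simp)]
  simp
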